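-- pv_equiv track=rewrite | github.com/HMCLMINU/BOJ | 프로그래머스/1/12916. 문자열 내 p와 y의 개수/문자열 내 p와 y의 개수.py | solution
-- ===== SOURCE A (Python) =====
-- def solution(s):
--     cnt = 0
--     for c in s:
--         if c == 'p' or c == 'P':
--             cnt+=1
--         elif c == 'y' or c == 'Y':
--             cnt-=1
--
--     return not cnt
-- ===== SOURCE B (Python) =====
-- def solution(s):
--     ps = [c for c in s if c in 'pP']
--     ys = [c for c in s if c in 'yY']
--     while ps and ys:
--         ps.pop()
--         ys.pop()
--     return not ps and not ys
-- ===== Notes on version B (the rewrite author's own statement) =====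
-- stated objective: alternative
-- what changed: Replaces A's single signed-accumulator counting loop with a pairing/cancellation scheme: collect p-like and y-like characters into two lists via comprehensions, cancel them off in pairs, and succeed iff both lists empty out together - no counter or arithmetic at all.
import Mathlib
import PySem

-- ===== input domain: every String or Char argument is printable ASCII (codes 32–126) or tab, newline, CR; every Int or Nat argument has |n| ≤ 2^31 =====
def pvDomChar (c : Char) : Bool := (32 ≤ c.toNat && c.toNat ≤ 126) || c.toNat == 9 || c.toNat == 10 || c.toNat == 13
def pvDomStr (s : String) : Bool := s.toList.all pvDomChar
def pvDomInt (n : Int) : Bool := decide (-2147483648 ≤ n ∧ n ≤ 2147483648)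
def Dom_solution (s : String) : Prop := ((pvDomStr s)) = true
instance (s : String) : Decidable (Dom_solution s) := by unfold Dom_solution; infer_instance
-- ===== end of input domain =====

-- B replaces A's signed-accumulator counting loop by pairing: the p-like and y-like
-- characters are collected into two lists and cancelled off in pairs (alternative).

-- ===== PORT A =====
def solution (s : String) : Bool :=
  let cnt : Int := s.toList.foldl (fun cnt c =>
    if c = 'p' ∨ c = 'P' then cnt + 1
    else if c = 'y' ∨ c = 'Y' then cnt - 1
    else cnt) 0
  decide (cnt = 0)

-- ===== PORT B =====
-- the while loop: pop() removes the LAST element of each list, so one iteration is dropLast on both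
def pvCancel (ps ys : List Char) : Bool :=
  if h : ps ≠ [] ∧ ys ≠ [] then pvCancel ps.dropLast ys.dropLast
  else ps.isEmpty && ys.isEmpty
termination_by ps.length
decreasing_by
  have := h.1
  have : 0 < ps.length := List.length_pos_of_ne_nil this
  simp [List.length_dropLast]; omega

-- 'c in 'pP'' for a single char is membership among the string's characters (exact here)
def solution_alt (s : String) : Bool :=
  let ps := s.toList.filter (fun c => c = 'p' || c = 'P')
  let ys := s.toList.filter (fun c => c = 'y' || c = 'Y')
  pvCancel ps ys

-- ===== PRECONDITION & SPEC =====
def Spec_solution (s : String) (out : Bool) : Prop := out = solution_alt s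
instance (s : String) (out : Bool) : Decidable (Spec_solution s out) := by unfold Spec_solution; infer_instance

-- ===== CLAIM (what is proved, stated in full; the proofs are below) =====
def Claim_equal_solution : Prop := ∀ (s : String), Dom_solution s → Spec_solution s (solution s)

-- ===== LEMMAS AND PROOFS =====

lemma pvCancel_eq (ps ys : List Char) : pvCancel ps ys = (ps.length == ys.length) := by
  induction ps, ys using pvCancel.induct with
  | case1 ps ys h ih =>
    rw [pvCancel, dif_pos h, ih]
    have h1 : 0 < ps.length := List.length_pos_of_ne_nil h.1
    have h2 : 0 < ys.length := List.length_pos_of_ne_nil h.2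
    simp only [List.length_dropLast]
    rcases Nat.decEq ps.length ys.length with hne | heq
    · simp only [beq_eq_false_iff_ne.mpr hne, beq_eq_false_iff_ne]; omega
    · simp only [heq, beq_self_eq_true]
  | case2 ps ys h =>
    rw [pvCancel, dif_neg h]
    push_neg at h
    rcases List.eq_nil_or_concat ps with hp | ⟨_, _, rfl⟩
    · subst hp
      cases ys <;> simp
    · have hy := h (by simp)
      subst hy
      simp

lemma foldl_signed (l : List Char) (a : Int) :
    l.foldl (fun cnt c =>
      if c = 'p' ∨ c = 'P' then cnt + 1
      else if c = 'y' ∨ c = 'Y' then cnt - 1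
      else cnt) a
    = a + ((l.filter (fun c => c = 'p' || c = 'P')).length : Int)
        - ((l.filter (fun c => c = 'y' || c = 'Y')).length : Int) := by
  induction l generalizing a with
  | nil => simp
  | cons x t ih =>
    simp only [List.foldl_cons, ih, List.filter_cons]
    by_cases hp : x = 'p' ∨ x = 'P'
    · have hp' : (x = 'p' || x = 'P') = true := by rcases hp with h | h <;> simp [h]
      have hy' : (x = 'y' || x = 'Y') = false := by
        rcases hp with h | h <;> subst h <;> decide
      simp only [if_pos hp, hp', hy', if_true, Bool.false_eq_true, if_false, List.length_cons]
      push_cast; ring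
    · have hp' : (x = 'p' || x = 'P') = false := by
        simp only [Bool.or_eq_false_iff, decide_eq_false_iff_not]; push_neg at hp
        exact ⟨by simp [hp.1], by simp [hp.2]⟩
      by_cases hy : x = 'y' ∨ x = 'Y'
      · have hy' : (x = 'y' || x = 'Y') = true := by rcases hy with h | h <;> simp [h]
        simp only [if_neg hp, if_pos hy, hp', hy', Bool.false_eq_true, if_false, if_true,
          List.length_cons]
        push_cast; ring
      · have hy' : (x = 'y' || x = 'Y') = false := by
          simp only [Bool.or_eq_false_iff, decide_eq_false_iff_not]; push_neg at hy
          exact ⟨by simp [hy.1], by simp [hy.2]⟩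
        simp [if_neg hp, if_neg hy, hp', hy']

-- ===== VERDICT (by name: the statement is the Claim_ definition above) =====
theorem solution_spec : Claim_equal_solution := by
  intro s _
  unfold Spec_solution solution solution_alt
  simp only [foldl_signed, pvCancel_eq]
  rcases Nat.decEq (s.toList.filter (fun c => c = 'p' || c = 'P')).length
      (s.toList.filter (fun c => c = 'y' || c = 'Y')).length with hne | heq
  · rw [beq_eq_false_iff_ne.mpr hne, decide_eq_false (by omega)]
  · rw [heq, beq_self_eq_true, decide_eq_true (by omega)]
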